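-- pv_equiv track=rewrite | github.com/saanviagarwal864/JECRC-SAANVI_AGARWAL-6207232-JECT6FEBOFF0207 | Day_9/Problem_01.py | count_equilibrium_rotations
-- ===== SOURCE A (Python) =====
-- def count_equilibrium_rotations(arr):
--     n = len(arr)
--     count = 0
--     for r in range(n):
--         found=False
--         for i in range(n):
--             left_sum=0
--             right_sum=0
--             for j in range(i):
--                 left_sum+=arr[j]
--
--             for j in range(i+1,n):
--                 right_sum+=arr[j]
--
--             if left_sum==right_sum:
--                 found=True
--                 break
--
--         if found:
--             count+=1
--
--         last=arr.pop() ##rotation inserted last element to first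
--         arr.insert(0,last)
--
--     return count
-- ===== SOURCE B (Python) =====
-- def _has_equilibrium(b, total):
--     left = 0
--     for x in b:
--         if 2 * left + x == total:
--             return True
--         left += x
--     return False
--
-- def count_equilibrium_rotations(arr):
--     total = sum(arr)
--     b = list(arr)
--     count = 0
--     for _ in range(len(arr)):
--         if _has_equilibrium(b, total):
--             count += 1
--         b = b[-1:] + b[:-1]
--     return count
-- ===== Notes on version B (the rewrite author's own statement) =====
-- stated objective: faster
-- what changed: Replaces the per-index O(n) left/right sum recomputation (A's triple nested loop) with a single running-prefix scan per rotation testing 2*left + x == total, using the total sum which is invariant under rotation; A also mutates arr in place (restoring it after the full cycle) while B leaves arr untouched.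
import Mathlib
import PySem

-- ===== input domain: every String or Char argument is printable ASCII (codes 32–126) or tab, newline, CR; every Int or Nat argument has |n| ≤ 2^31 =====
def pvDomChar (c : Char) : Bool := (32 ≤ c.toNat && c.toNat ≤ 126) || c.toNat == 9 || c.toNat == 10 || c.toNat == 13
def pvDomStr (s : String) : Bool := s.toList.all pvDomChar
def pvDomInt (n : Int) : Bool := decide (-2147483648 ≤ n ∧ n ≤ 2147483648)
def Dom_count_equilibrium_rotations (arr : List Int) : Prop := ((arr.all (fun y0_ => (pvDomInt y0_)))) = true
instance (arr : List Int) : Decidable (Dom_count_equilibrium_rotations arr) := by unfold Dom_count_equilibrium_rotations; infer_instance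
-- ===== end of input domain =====

-- B replaces A's per-index left/right sum recomputation with one running-prefix scan per rotation
-- (2*left + x == total, total invariant under rotation): O(n^2) instead of O(n^3).
-- A mutates arr in place but restores it after the full rotation cycle; the equivalence is about the return value.

-- ===== PORT A =====
-- left_sum loop: for j in range(i): left_sum += arr[j]
def pyLeftSum (a : List Int) (i : Nat) : Int :=
  (List.range i).foldl (fun s j => s + a.getD j 0) 0

-- right_sum loop: for j in range(i+1, n): right_sum += arr[j]
def pyRightSum (a : List Int) (i n : Nat) : Int :=
  (List.range' (i+1) (n - (i+1))).foldl (fun s j => s + a.getD j 0) 0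

-- inner i-loop with found/break
def foundA (a : List Int) (n : Nat) : Bool :=
  (List.range n).foldl
    (fun f i => if f then f else if pyLeftSum a i == pyRightSum a i n then true else f) false

def count_equilibrium_rotations (arr : List Int) : Int :=
  let n := arr.length
  ((List.range n).foldl
    (fun (st : Int × List Int) _ =>
      let c := if foundA st.2 n then st.1 + 1 else st.1
      -- last = arr.pop(); arr.insert(0, last)  (arr nonempty whenever the loop body runs)
      (c, st.2.getLastD 0 :: st.2.dropLast))
    ((0 : Int), arr)).1

-- ===== PORT B =====
-- running-prefix scan with early return: 2*left + x == total
def scanB (total : Int) (left : Int) : List Int → Bool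
  | [] => false
  | x :: xs => if 2 * left + x == total then true else scanB total (left + x) xs

-- b = b[-1:] + b[:-1]
def rotB (b : List Int) : List Int :=
  b.drop (b.length - 1) ++ b.take (b.length - 1)

def count_equilibrium_rotations_alt (arr : List Int) : Int :=
  let total := arr.sum
  ((List.range arr.length).foldl
    (fun (st : Int × List Int) _ =>
      ((if scanB total 0 st.2 then st.1 + 1 else st.1), rotB st.2))
    ((0 : Int), arr)).1

-- ===== PRECONDITION & SPEC =====
def Spec_count_equilibrium_rotations (arr : List Int) (out : Int) : Prop := out = count_equilibrium_rotations_alt arr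
instance (arr : List Int) (out : Int) : Decidable (Spec_count_equilibrium_rotations arr out) := by unfold Spec_count_equilibrium_rotations; infer_instance

-- ===== CLAIM (what is proved, stated in full; the proofs are below) =====
def Claim_equal_count_equilibrium_rotations : Prop := ∀ (arr : List Int), Dom_count_equilibrium_rotations arr → Spec_count_equilibrium_rotations arr (count_equilibrium_rotations arr)

-- ===== LEMMAS AND PROOFS =====

theorem any_congr_mem {α : Type} (l : List α) (p q : α → Bool)
    (h : ∀ a ∈ l, p a = q a) : l.any p = l.any q := by
  induction l with
  | nil => rfl
  | cons x xs ih =>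
      simp only [List.any_cons, h x (by simp), ih (fun a ha => h a (by simp [ha]))]

-- generic range'-sum lemma: the index loop sums a contiguous chunk of the list
theorem rangeSum_eq (a : List Int) :
    ∀ (k j : Nat) (s0 : Int),
      (List.range' j k).foldl (fun s t => s + a.getD t 0) s0
        = s0 + ((a.drop j).take k).sum := by
  intro k
  induction k with
  | zero => intro j s0; simp
  | succ k ih =>
      intro j s0
      rw [List.range'_succ, List.foldl_cons, ih (j+1) (s0 + a.getD j 0)]
      by_cases hj : j < a.length
      · rw [List.drop_eq_getElem_cons hj, List.take_succ_cons, List.sum_cons]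
        have hg : a.getD j 0 = a[j] := by
          simp [List.getD, List.getElem?_eq_getElem hj]
        rw [hg]; ring
      · have h1 : a.drop j = [] := by rw [List.drop_eq_nil_iff]; omega
        have h2 : a.drop (j+1) = [] := by rw [List.drop_eq_nil_iff]; omega
        have hg : a.getD j 0 = 0 := by
          simp [List.getD, List.getElem?_eq_none (show a.length ≤ j by omega)]
        rw [h1, h2, hg]; simp

theorem pyLeftSum_eq (a : List Int) (i : Nat) :
    pyLeftSum a i = (a.take i).sum := by
  unfold pyLeftSum
  rw [List.range_eq_range', rangeSum_eq a i 0 0]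
  simp

theorem pyRightSum_eq (a : List Int) (i : Nat) :
    pyRightSum a i a.length = (a.drop (i+1)).sum := by
  unfold pyRightSum
  rw [rangeSum_eq a (a.length - (i+1)) (i+1) 0]
  have h : (a.drop (i+1)).length = a.length - (i+1) := by simp
  rw [← h, List.take_length]
  simp

-- the found/break loop is an 'any'
theorem foldl_or (p : Nat → Bool) :
    ∀ (l : List Nat) (b : Bool),
      l.foldl (fun f i => if f then f else if p i then true else f) b = (b || l.any p) := by
  intro l
  induction l with
  | nil => intro b; simp
  | cons x xs ih =>
      intro b
      rw [List.foldl_cons, ih]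
      cases b <;> cases h : p x <;> simp [h]

-- the scan is an 'any' over prefix sums
theorem scanB_eq_any (S : Int) :
    ∀ (a : List Int) (left : Int),
      scanB S left a
        = (List.range a.length).any
            (fun i => 2 * (left + (a.take i).sum) + a.getD i 0 == S) := by
  intro a
  induction a with
  | nil => intro left; simp [scanB]
  | cons x xs ih =>
      intro left
      rw [scanB, List.length_cons, List.range_succ_eq_map, List.any_cons, List.any_map,
        ih (left + x)]
      have hmap :
          (List.range xs.length).any
              ((fun i => 2 * (left + ((x :: xs).take i).sum) + (x :: xs).getD i 0 == S)
                ∘ Nat.succ)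
            = (List.range xs.length).any
                (fun i => 2 * ((left + x) + (xs.take i).sum) + xs.getD i 0 == S) := by
        apply any_congr_mem
        intro i _
        simp only [Function.comp_apply, List.take_succ_cons, List.sum_cons,
          List.getD_cons_succ]
        have e : 2 * (left + (x + (xs.take i).sum)) = 2 * ((left + x) + (xs.take i).sum) := by
          ring
        rw [e]
      rw [hmap]
      have h0 : (2 * (left + ((x :: xs).take 0).sum) + (x :: xs).getD 0 0 == S)
          = (2 * left + x == S) := by
        simp only [List.take_zero, List.sum_nil, add_zero, List.getD_cons_zero]
      rw [h0]
      cases hcond : (2 * left + x == S) <;> simp [hcond]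

-- the two existence tests agree when n is the length and S the sum
theorem foundA_eq_scanB (b : List Int) :
    foundA b b.length = scanB b.sum 0 b := by
  unfold foundA
  rw [foldl_or, scanB_eq_any, Bool.false_or]
  apply any_congr_mem
  intro i hi
  rw [List.mem_range] at hi
  rw [pyLeftSum_eq, pyRightSum_eq]
  have hsplit : b.sum = (b.take i).sum + b.getD i 0 + (b.drop (i+1)).sum := by
    conv_lhs => rw [← List.take_append_drop i b]
    rw [List.drop_eq_getElem_cons hi]
    have hg : b.getD i 0 = b[i] := by
      simp [List.getD, List.getElem?_eq_getElem hi]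
    rw [List.sum_append, List.sum_cons, hg]
    ring
  rw [Bool.eq_iff_iff]
  simp only [beq_iff_eq]
  omega

-- rotations: A's pop/insert equals B's slice rotation on nonempty lists
theorem rotA_eq_rotB (b : List Int) (hb : b ≠ []) :
    b.getLastD 0 :: b.dropLast = rotB b := by
  rcases List.eq_nil_or_concat b with h | ⟨ys, x, rfl⟩
  · exact absurd h hb
  · unfold rotB
    simp

theorem rotB_length (b : List Int) : (rotB b).length = b.length := by
  unfold rotB
  simp

theorem rotB_sum (b : List Int) : (rotB b).sum = b.sum := by
  unfold rotB
  rw [List.sum_append, add_comm, ← List.sum_append, List.take_append_drop]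

-- the outer fold: both loops keep (count, current rotation); counts stay equal
theorem outer_eq (n : Nat) (S : Int) (hn : 0 < n) :
    ∀ (l : List Nat) (c : Int) (b : List Int), b.length = n → b.sum = S →
      (l.foldl
        (fun (st : Int × List Int) _ =>
          ((if foundA st.2 n then st.1 + 1 else st.1), st.2.getLastD 0 :: st.2.dropLast))
        (c, b)).1
      = (l.foldl
        (fun (st : Int × List Int) _ =>
          ((if scanB S 0 st.2 then st.1 + 1 else st.1), rotB st.2))
        (c, b)).1 := by
  intro l
  induction l with
  | nil => intro c b _ _; simp
  | cons x xs ih =>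
      intro c b hlen hsum
      have hne : b ≠ [] := by
        intro h; rw [h] at hlen; simp at hlen; omega
      simp only [List.foldl_cons]
      have h1 : foundA b n = scanB S 0 b := by
        rw [← hlen, ← hsum, foundA_eq_scanB]
      rw [h1, rotA_eq_rotB b hne]
      exact ih _ (rotB b) (by rw [rotB_length, hlen]) (by rw [rotB_sum, hsum])

-- ===== VERDICT (by name: the statement is the Claim_ definition above) =====
theorem count_equilibrium_rotations_spec : Claim_equal_count_equilibrium_rotations := by
  intro arr _
  unfold Spec_count_equilibrium_rotations count_equilibrium_rotations count_equilibrium_rotations_alt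
  by_cases h : arr.length = 0
  · simp [h]
  · exact outer_eq arr.length arr.sum (by omega) (List.range arr.length) 0 arr rfl rfl
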